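-- pv_equiv track=rewrite | github.com/gusflores89/wayne-dashboard | mls_next_scraper.py | clasificar_emails
-- ===== SOURCE A (Python) =====
-- def clasificar_emails(emails):
--     """Clasifica emails por tipo (director vs general)"""
--     director_email = None
--     club_email = None
--
--     for email in emails:
--         email_lower = email.lower()
--
--         # Buscar email de director
--         if any(x in email_lower for x in ['director', 'doc', 'president', 'executive', 'admin']):
--             if not director_email:
--                 director_email = email
--
--         # Buscar email general
--         if any(x in email_lower for x in ['info', 'contact', 'office', 'hello', 'general']):
--             if not club_email:
--                 club_email = email
--
--     # Si no encontramos específicos, usar el primero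
--     if not director_email and not club_email and emails:
--         club_email = emails[0]
--
--     return director_email, club_email
-- ===== SOURCE B (Python) =====
-- DIRECTOR_KEYS = ['director', 'doc', 'president', 'executive', 'admin']
-- GENERAL_KEYS = ['info', 'contact', 'office', 'hello', 'general']
--
--
-- def clasificar_emails(emails):
--     """Clasifica emails por tipo (director vs general)"""
--     # Walk the list BACKWARDS and overwrite unconditionally: after the loop each
--     # slot holds the first matching email of the original order (last write wins).
--     director_email = None
--     club_email = None
--     for email in reversed(emails):
--         low = email.lower()
--         if any(k in low for k in DIRECTOR_KEYS):
--             director_email = email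
--         if any(k in low for k in GENERAL_KEYS):
--             club_email = email
--     if not director_email and not club_email and emails:
--         club_email = emails[0]
--     return director_email, club_email
-- ===== Notes on version B (the rewrite author's own statement) =====
-- stated objective: alternative
-- what changed: Replaces A's forward loop with 'set only if not already set' guards by a backwards traversal that overwrites the two slots unconditionally (last-write-wins over the reversed list equals first match of the original list), same fallback.
import Mathlib
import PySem

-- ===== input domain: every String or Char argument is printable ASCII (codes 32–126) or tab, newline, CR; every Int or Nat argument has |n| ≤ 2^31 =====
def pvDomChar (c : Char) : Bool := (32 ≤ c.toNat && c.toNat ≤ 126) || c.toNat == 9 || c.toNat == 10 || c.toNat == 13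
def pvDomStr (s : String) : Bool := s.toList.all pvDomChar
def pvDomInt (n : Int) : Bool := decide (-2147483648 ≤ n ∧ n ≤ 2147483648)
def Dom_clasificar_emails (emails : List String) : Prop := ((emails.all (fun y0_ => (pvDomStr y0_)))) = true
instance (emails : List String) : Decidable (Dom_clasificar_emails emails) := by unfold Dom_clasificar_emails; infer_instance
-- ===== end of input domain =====

-- B replaces A's forward guarded first-match loop by a backwards traversal that
-- overwrites unconditionally (alternative decomposition; return value proved equal).
-- ===== PORT A =====
-- the two keyword tables of A
def pvDirKeys : List String := ["director", "doc", "president", "executive", "admin"]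
def pvGenKeys : List String := ["info", "contact", "office", "hello", "general"]
-- Python truthiness of an Optional[str] value (None and "" are falsy)
def pvTruthy (o : Option String) : Bool := match o with | none => false | some s => s != ""

-- the for-loop of A, carrying (director_email, club_email); sets a slot only if not truthy
def pvLoopA : List String → Option String → Option String → Option String × Option String
  | [], d, g => (d, g)
  | e :: es, d, g =>
    let el := PySem.Str.lower e
    let d' := if pvDirKeys.any (fun x => PySem.Str.isIn x el) && !pvTruthy d then some e else d
    let g' := if pvGenKeys.any (fun x => PySem.Str.isIn x el) && !pvTruthy g then some e else g
    pvLoopA es d' g'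

def clasificar_emails (emails : List String) : Option String × Option String :=
  let r := pvLoopA emails none none
  if !pvTruthy r.1 && !pvTruthy r.2 && !emails.isEmpty then (r.1, emails.head?) else r

-- ===== PORT B =====
-- 'any(k in e.lower() for k in KEYS)'
def pvMatches (keys : List String) (e : String) : Bool :=
  keys.any (fun k => PySem.Str.isIn k (PySem.Str.lower e))

-- B's loop over reversed(emails): overwrite each slot unconditionally on a match
def pvLoopB : List String → Option String → Option String → Option String × Option String
  | [], d, g => (d, g)
  | e :: es, d, g =>
    pvLoopB es (if pvMatches pvDirKeys e then some e else d)
               (if pvMatches pvGenKeys e then some e else g)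

def clasificar_emails_alt (emails : List String) : Option String × Option String :=
  let r := pvLoopB emails.reverse none none
  if !pvTruthy r.1 && !pvTruthy r.2 && !emails.isEmpty then (r.1, emails.head?) else r

-- ===== PRECONDITION & SPEC =====
def Spec_clasificar_emails (emails : List String) (out : Option String × Option String) : Prop := out = clasificar_emails_alt emails
instance (emails : List String) (out : Option String × Option String) : Decidable (Spec_clasificar_emails emails out) := by unfold Spec_clasificar_emails; infer_instance

-- ===== CLAIM (what is proved, stated in full; the proofs are below) =====
def Claim_equal_clasificar_emails : Prop := ∀ (emails : List String), Dom_clasificar_emails emails → Spec_clasificar_emails emails (clasificar_emails emails)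

-- ===== LEMMAS AND PROOFS =====

-- no keyword matches the empty string, so a matched email is Python-truthy
lemma matchD_empty : pvMatches pvDirKeys "" = false := by decide
lemma matchG_empty : pvMatches pvGenKeys "" = false := by decide

-- one component of A's loop step: prepending e to the first-match scan commutes with Option.or
lemma or_step (keys : List String) (e : String) (es : List String) (o : Option String)
    (ho : o = none ∨ pvTruthy o = true) :
    ((if pvMatches keys e && !pvTruthy o then some e else o).or (es.find? (pvMatches keys)))
      = o.or ((e :: es).find? (pvMatches keys)) := by
  rcases ho with rfl | h
  · by_cases hm : pvMatches keys e = true <;>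
      rw [List.find?_cons] <;> simp [hm, pvTruthy]
  · cases o with
    | none => simp [pvTruthy] at h
    | some x => simp [h]

-- the new state after one A-step keeps the invariant (none or truthy)
lemma step_inv (keys : List String) (e : String) (o : Option String)
    (hne : pvMatches keys e = true → e ≠ "") (ho : o = none ∨ pvTruthy o = true) :
    (if pvMatches keys e && !pvTruthy o then some e else o) = none ∨
      pvTruthy (if pvMatches keys e && !pvTruthy o then some e else o) = true := by
  rcases ho with rfl | h
  · by_cases hm : pvMatches keys e = true
    · right; simp [hm, pvTruthy, hne hm]
    · left; simp [hm, pvTruthy]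
  · right; rw [show (if pvMatches keys e && !pvTruthy o then some e else o) = o by simp [h]]
    exact h

-- A's interleaved guarded loop computes the two first matches
lemma loopA_eq : ∀ (es : List String) (d g : Option String),
    (d = none ∨ pvTruthy d = true) → (g = none ∨ pvTruthy g = true) →
    pvLoopA es d g =
      (d.or (es.find? (pvMatches pvDirKeys)), g.or (es.find? (pvMatches pvGenKeys)))
  | [], d, g, hd, hg => by cases d <;> cases g <;> simp [pvLoopA]
  | e :: es, d, g, hd, hg => by
    have hDne : pvMatches pvDirKeys e = true → e ≠ "" := by
      intro hm h0; rw [h0, matchD_empty] at hm; exact absurd hm (by simp)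
    have hGne : pvMatches pvGenKeys e = true → e ≠ "" := by
      intro hm h0; rw [h0, matchG_empty] at hm; exact absurd hm (by simp)
    have hstep : pvLoopA (e :: es) d g = pvLoopA es
        (if pvMatches pvDirKeys e && !pvTruthy d then some e else d)
        (if pvMatches pvGenKeys e && !pvTruthy g then some e else g) := rfl
    rw [hstep, loopA_eq es _ _ (step_inv _ _ _ hDne hd) (step_inv _ _ _ hGne hg)]
    simp only [Prod.mk.injEq]
    exact ⟨or_step _ _ _ _ hd, or_step _ _ _ _ hg⟩

-- B's overwrite loop keeps the LAST match of its traversal order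
lemma loopB_eq : ∀ (es : List String) (d g : Option String),
    pvLoopB es d g =
      ((es.reverse.find? (pvMatches pvDirKeys)).or d,
       (es.reverse.find? (pvMatches pvGenKeys)).or g)
  | [], d, g => by simp [pvLoopB]
  | e :: es, d, g => by
    rw [show pvLoopB (e :: es) d g = pvLoopB es
        (if pvMatches pvDirKeys e then some e else d)
        (if pvMatches pvGenKeys e then some e else g) from rfl, loopB_eq es]
    simp only [List.reverse_cons, List.find?_append, Prod.mk.injEq]
    constructor
    · by_cases hm : pvMatches pvDirKeys e = true <;> simp [List.find?, hm]
    · by_cases hm : pvMatches pvGenKeys e = true <;> simp [List.find?, hm]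

-- ===== VERDICT (by name: the statement is the Claim_ definition above) =====
theorem clasificar_emails_spec : Claim_equal_clasificar_emails := by
  intro emails _
  unfold Spec_clasificar_emails clasificar_emails clasificar_emails_alt
  rw [loopA_eq emails none none (Or.inl rfl) (Or.inl rfl), loopB_eq, List.reverse_reverse]
  simp only [Option.none_or, Option.or_none]
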